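-- pv_equiv track=rewrite | github.com/harshitha-purama/azure-data-engineering-project | src/run_sql_script.py | split_batches
-- ===== SOURCE A (Python) =====
-- def split_batches(sql_text: str) -> list[str]:
--     lines = sql_text.splitlines()
--     batches: list[str] = []
--     current: list[str] = []
--
--     for line in lines:
--         if line.strip().upper() == "GO":
--             batch = "\n".join(current).strip()
--             if batch:
--                 batches.append(batch)
--             current = []
--         else:
--             current.append(line)
--
--     last_batch = "\n".join(current).strip()
--     if last_batch:
--         batches.append(last_batch)
--
--     return batches
-- ===== SOURCE B (Python) =====
-- def split_batches(sql_text: str) -> list[str]: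
--     batches: list[str] = []
--     lines = sql_text.splitlines()
--     while True:
--         i = next((k for k, line in enumerate(lines)
--                   if line.strip().upper() == "GO"), None)
--         chunk = "\n".join(lines if i is None else lines[:i]).strip()
--         if chunk:
--             batches.append(chunk)
--         if i is None:
--             return batches
--         lines = lines[i + 1:]
-- ===== Notes on version B (the rewrite author's own statement) =====
-- stated objective: alternative
-- what changed: Replaces A's per-line fold that accumulates the current batch's lines with a find-first-GO-separator-and-slice loop: each iteration locates the next GO line, joins/strips the whole segment before it at once, and continues on the suffix after it.
import Mathlib
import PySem

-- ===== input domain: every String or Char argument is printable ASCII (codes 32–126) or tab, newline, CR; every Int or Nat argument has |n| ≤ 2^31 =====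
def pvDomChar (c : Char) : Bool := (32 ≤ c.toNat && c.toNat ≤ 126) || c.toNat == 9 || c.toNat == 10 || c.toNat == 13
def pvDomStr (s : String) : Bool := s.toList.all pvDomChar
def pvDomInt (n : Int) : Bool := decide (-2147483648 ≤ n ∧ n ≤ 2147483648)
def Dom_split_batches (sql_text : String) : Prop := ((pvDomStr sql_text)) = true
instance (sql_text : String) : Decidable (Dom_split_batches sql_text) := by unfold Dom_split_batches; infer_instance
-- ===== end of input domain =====

-- B replaces A's per-line accumulator fold by a find-first-separator-and-slice loop (objective: alternative, same cost).

-- ===== PORT A =====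
-- one step of A's for-loop: state = (batches, current)
def pvStepA (st : List String × List String) (line : String) : List String × List String :=
  if PySem.Str.upper (PySem.Str.strip line) == "GO" then
    let batch := PySem.Str.strip (PySem.Str.join "\n" st.2)
    (if batch ≠ "" then st.1 ++ [batch] else st.1, [])
  else
    (st.1, st.2 ++ [line])

def split_batches (sql_text : String) : List String :=
  let lines := PySem.Str.splitlines sql_text
  let st := lines.foldl pvStepA ([], [])
  let last_batch := PySem.Str.strip (PySem.Str.join "\n" st.2)
  if last_batch ≠ "" then st.1 ++ [last_batch] else st.1

-- ===== PORT B =====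
def pvIsGo (line : String) : Bool := PySem.Str.upper (PySem.Str.strip line) == "GO"

-- B's while-loop: find the first GO line, emit the stripped join of everything before it, continue after it
def pvSplitLoop (batches : List String) (lines : List String) : List String :=
  match h : lines.findIdx? pvIsGo with
  | none =>
      let chunk := PySem.Str.strip (PySem.Str.join "\n" lines)
      if chunk ≠ "" then batches ++ [chunk] else batches
  | some i =>
      let chunk := PySem.Str.strip (PySem.Str.join "\n" (lines.take i))
      pvSplitLoop (if chunk ≠ "" then batches ++ [chunk] else batches) (lines.drop (i + 1))
termination_by lines.length
decreasing_by
  have hi : i < lines.length := by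
    have := List.findIdx?_eq_some_iff_findIdx_eq.mp h
    omega
  simp [List.length_drop]; omega

def split_batches_alt (sql_text : String) : List String :=
  pvSplitLoop [] (PySem.Str.splitlines sql_text)

-- ===== PRECONDITION & SPEC =====
def Spec_split_batches (sql_text : String) (out : List String) : Prop := out = split_batches_alt sql_text
instance (sql_text : String) (out : List String) : Decidable (Spec_split_batches sql_text out) := by unfold Spec_split_batches; infer_instance

-- ===== CLAIM (what is proved, stated in full; the proofs are below) =====
def Claim_equal_split_batches : Prop := ∀ (sql_text : String), Dom_split_batches sql_text → Spec_split_batches sql_text (split_batches sql_text)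

-- ===== LEMMAS AND PROOFS =====

-- A's finalisation step
def pvFinA (st : List String × List String) : List String :=
  let last_batch := PySem.Str.strip (PySem.Str.join "\n" st.2)
  if last_batch ≠ "" then st.1 ++ [last_batch] else st.1

lemma pvSplitLoop_none {lines : List String} (h : lines.findIdx? pvIsGo = none) (batches : List String) :
    pvSplitLoop batches lines =
      (if PySem.Str.strip (PySem.Str.join "\n" lines) ≠ "" then
        batches ++ [PySem.Str.strip (PySem.Str.join "\n" lines)] else batches) := by
  rw [pvSplitLoop]
  split <;> simp_all

lemma pvSplitLoop_some {lines : List String} {i : ℕ} (h : lines.findIdx? pvIsGo = some i) (batches : List String) :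
    pvSplitLoop batches lines =
      pvSplitLoop (if PySem.Str.strip (PySem.Str.join "\n" (lines.take i)) ≠ "" then
          batches ++ [PySem.Str.strip (PySem.Str.join "\n" (lines.take i))] else batches)
        (lines.drop (i + 1)) := by
  rw [pvSplitLoop]
  split <;> simp_all

lemma pvFindIdx_append_go {current : List String} {l : String} {ls : List String}
    (hcur : ∀ x ∈ current, pvIsGo x = false) (hl : pvIsGo l = true) :
    (current ++ l :: ls).findIdx? pvIsGo = some current.length := by
  rw [List.findIdx?_append, List.findIdx?_eq_none_iff.mpr hcur, List.findIdx?_cons, hl]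
  simp

lemma pvMain : ∀ (lines batches current : List String), (∀ x ∈ current, pvIsGo x = false) →
    pvFinA (lines.foldl pvStepA (batches, current)) = pvSplitLoop batches (current ++ lines) := by
  intro lines
  induction lines with
  | nil =>
      intro batches current hcur
      rw [List.append_nil, pvSplitLoop_none (List.findIdx?_eq_none_iff.mpr hcur)]
      rfl
  | cons l ls ih =>
      intro batches current hcur
      by_cases hl : pvIsGo l = true
      · rw [pvSplitLoop_some (pvFindIdx_append_go hcur hl)]
        have htake : (current ++ l :: ls).take current.length = current := List.take_left
        have hdrop : (current ++ l :: ls).drop (current.length + 1) = ls := by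
          have : (current ++ l :: ls).drop current.length = l :: ls := List.drop_left
          rw [← List.drop_drop, this]
          rfl
        rw [htake, hdrop, List.foldl_cons]
        have hstep : pvStepA (batches, current) l =
            (if PySem.Str.strip (PySem.Str.join "\n" current) ≠ "" then
              batches ++ [PySem.Str.strip (PySem.Str.join "\n" current)] else batches, []) := by
          simp only [pvStepA, pvIsGo] at hl ⊢
          rw [if_pos hl]
        rw [hstep]
        have := ih (if PySem.Str.strip (PySem.Str.join "\n" current) ≠ "" then
              batches ++ [PySem.Str.strip (PySem.Str.join "\n" current)] else batches) [] (by simp)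
        simpa using this
      · rw [List.foldl_cons]
        have hl' : pvIsGo l = false := by simpa using hl
        have hstep : pvStepA (batches, current) l = (batches, current ++ [l]) := by
          simp only [pvStepA, pvIsGo] at hl' ⊢
          rw [if_neg (by simp [hl'])]
        rw [hstep]
        have hcur' : ∀ x ∈ current ++ [l], pvIsGo x = false := by
          intro x hx
          rcases List.mem_append.mp hx with h | h
          · exact hcur x h
          · simp at h; subst h; exact hl'
        rw [ih batches (current ++ [l]) hcur']
        simp

-- ===== VERDICT (by name: the statement is the Claim_ definition above) =====
theorem split_batches_spec : Claim_equal_split_batches := by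
  intro sql_text _
  show split_batches sql_text = split_batches_alt sql_text
  unfold split_batches split_batches_alt
  have := pvMain (PySem.Str.splitlines sql_text) [] [] (by simp)
  simpa [pvFinA] using this
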